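-- pv_equiv track=rewrite | github.com/SpaceCoder123/DSAPython | MatrixQuestion.py | findElementPart2
-- ===== SOURCE A (Python) =====
-- def findElementPart2(matrix, element):
--     result = False
--     for i in range(len(matrix)):
--         if element >= matrix[i][0] and element <= matrix[i][len(matrix[i])-1]:
--             result = binarySearch(matrix[i], 0, len(matrix[i])-1, element)
--             if result:
--                 return True
--     return result
--
-- def binarySearch(arr, first, last, element):
--     if first > last:
--         return False
--
--     mid = (first+last)//2
--     if arr[mid] == element or arr[first] == element or arr[last] == element:
--         return True
--     if arr[mid] < element:
--         return binarySearch(arr, mid+1, last, element)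
--     else:
--         return binarySearch(arr, first, mid-1, element)
--
-- arr = [[1,2,3],[4,5,6],[7,8,9]]
-- ===== SOURCE B (Python) =====
-- def _hits(row, element):
--     lo, hi = 0, len(row) - 1
--     while lo <= hi:
--         mid = (lo + hi) // 2
--         if element in (row[lo], row[mid], row[hi]):
--             return True
--         if row[mid] < element:
--             lo = mid + 1
--         else:
--             hi = mid - 1
--     return False
--
-- def findElementPart2(matrix, element):
--     return any(row[0] <= element <= row[-1] and _hits(row, element) for row in matrix)
-- ===== Notes on version B (the rewrite author's own statement) =====
-- stated objective: simpler
-- what changed: The recursive three-argument search helper and the threaded result flag over an indexed row loop are replaced by an inline iterative two-pointer loop with early exit inside a single any() over the rows; Pre_ excludes matrices containing an empty row, on which A raises IndexError when that row is reached.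
-- outside the precondition, e.g. on findElementPart2([[1], []], 1): A returns True, B returns True; on findElementPart2([[]], 5): A raises IndexError, B raises IndexError
import Mathlib
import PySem

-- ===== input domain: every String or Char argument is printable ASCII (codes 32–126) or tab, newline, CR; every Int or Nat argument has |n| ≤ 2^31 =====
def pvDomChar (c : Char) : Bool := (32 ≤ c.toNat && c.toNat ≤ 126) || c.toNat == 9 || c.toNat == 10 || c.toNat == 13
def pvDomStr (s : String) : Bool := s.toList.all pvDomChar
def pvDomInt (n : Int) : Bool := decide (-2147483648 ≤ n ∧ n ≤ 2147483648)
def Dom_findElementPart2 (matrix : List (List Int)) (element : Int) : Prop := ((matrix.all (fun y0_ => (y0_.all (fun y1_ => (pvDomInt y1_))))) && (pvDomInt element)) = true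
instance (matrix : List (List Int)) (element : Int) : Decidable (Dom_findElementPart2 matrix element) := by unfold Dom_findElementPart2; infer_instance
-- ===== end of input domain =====

-- B replaces A's recursive search helper and threaded result flag by an inline iterative
-- two-pointer loop with early exit inside a single any() over the rows (simpler decomposition,
-- same cost; equal wherever A returns).

-- ===== PORT A =====
-- Python indexing arr[i]; the default 0 is never reached on inputs admitted by Pre_.
def pyIdx (arr : List Int) (i : Int) : Int := (PySem.List.pyGet? arr i).getD 0

-- literal port of binarySearch(arr, first, last, element); the recursion is realised
-- structurally on a fuel counter equal to the initial range length (the range shrinks by at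
-- least one per call, so the fuel is never exhausted before `first > last`): exact on every input
def bsGo (arr : List Int) (element : Int) : Nat → Int → Int → Bool
  | 0, _, _ => false
  | n + 1, first, last =>
    if first > last then false
    else
      let mid := PySem.Int.floordiv (first + last) 2
      if pyIdx arr mid = element ∨ pyIdx arr first = element ∨ pyIdx arr last = element then true
      else if pyIdx arr mid < element then bsGo arr element n (mid + 1) last
      else bsGo arr element n first (mid - 1)

def binarySearchA (arr : List Int) (first last element : Int) : Bool :=
  bsGo arr element ((last - first + 1).toNat) first last

-- the for-loop over the rows, threading Python's `result` variable
def goA (rows : List (List Int)) (element : Int) (result : Bool) : Bool :=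
  match rows with
  | [] => result
  | row :: rest =>
      if element ≥ pyIdx row 0 ∧ element ≤ pyIdx row ((row.length : Int) - 1) then
        let r := binarySearchA row 0 ((row.length : Int) - 1) element
        if r then true else goA rest element r
      else goA rest element result

def findElementPart2 (matrix : List (List Int)) (element : Int) : Bool :=
  goA matrix element false

-- ===== PORT B =====
-- the while-loop of _hits, as a fueled tail recursion on the two pointers (fuel = row length,
-- never exhausted before lo > hi: the range shrinks each iteration); exact on every input
def hitsGo (row : List Int) (element : Int) : Nat → Int → Int → Bool
  | 0, _, _ => false
  | n + 1, lo, hi =>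
    if lo ≤ hi then
      let mid := PySem.Int.floordiv (lo + hi) 2
      if [pyIdx row lo, pyIdx row mid, pyIdx row hi].contains element then true
      else if pyIdx row mid < element then hitsGo row element n (mid + 1) hi
      else hitsGo row element n lo (mid - 1)
    else false

def hits (row : List Int) (element : Int) : Bool :=
  hitsGo row element row.length 0 ((row.length : Int) - 1)

def findElementPart2_alt (matrix : List (List Int)) (element : Int) : Bool :=
  matrix.any (fun row =>
    decide (pyIdx row 0 ≤ element ∧ element ≤ pyIdx row (-1)) && hits row element)

-- ===== PRECONDITION & SPEC =====
-- Pre_ excludes matrices containing an empty row: there A raises IndexError reading the row's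
-- first element when that row is reached (except when an earlier row already produced True,
-- where both programs return True).
def Pre_findElementPart2 (matrix : List (List Int)) (element : Int) : Prop :=
  ∀ row ∈ matrix, row ≠ []
instance (matrix : List (List Int)) (element : Int) : Decidable (Pre_findElementPart2 matrix element) := by unfold Pre_findElementPart2; infer_instance

def pvWitness_findElementPart2 : List (List Int) × Int := ([[1, 2, 3], [4, 5, 6], [7, 8, 9]], 5)

def Spec_findElementPart2 (matrix : List (List Int)) (element : Int) (out : Bool) : Prop := out = findElementPart2_alt matrix element
instance (matrix : List (List Int)) (element : Int) (out : Bool) : Decidable (Spec_findElementPart2 matrix element out) := by unfold Spec_findElementPart2; infer_instance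

-- ===== CLAIM =====
def Claim_equal_findElementPart2 : Prop := ∀ (matrix : List (List Int)) (element : Int), Dom_findElementPart2 matrix element → Pre_findElementPart2 matrix element → Spec_findElementPart2 matrix element (findElementPart2 matrix element)

-- ===== LEMMAS AND PROOFS =====

-- B's while-loop walks exactly A's probe path: the two loop bodies agree step for step
lemma hitsGo_eq_bsGo (row : List Int) (element : Int) :
    ∀ n : ℕ, ∀ lo hi : Int, hitsGo row element n lo hi = bsGo row element n lo hi := by
  intro n
  induction n with
  | zero => intro lo hi; rfl
  | succ n ih =>
    intro lo hi
    rw [hitsGo, bsGo]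
    by_cases hlh : lo > hi
    · rw [if_neg (by omega), if_pos hlh]
    · rw [if_pos (by omega : lo ≤ hi), if_neg hlh]
      simp only []
      set mid := PySem.Int.floordiv (lo + hi) 2 with hmid
      have hc : ([pyIdx row lo, pyIdx row mid, pyIdx row hi].contains element = true) ↔
          (pyIdx row mid = element ∨ pyIdx row lo = element ∨ pyIdx row hi = element) := by
        simp only [List.contains_iff_mem, List.mem_cons, List.not_mem_nil, or_false]
        constructor
        · rintro (h | h | h)
          · exact Or.inr (Or.inl h.symm)
          · exact Or.inl h.symm
          · exact Or.inr (Or.inr h.symm)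
        · rintro (h | h | h)
          · exact Or.inr (Or.inl h.symm)
          · exact Or.inl h.symm
          · exact Or.inr (Or.inr h.symm)
      by_cases hp : pyIdx row mid = element ∨ pyIdx row lo = element ∨ pyIdx row hi = element
      · rw [if_pos (hc.mpr hp), if_pos hp]
      · rw [if_neg (fun h => hp (hc.mp h)), if_neg hp]
        by_cases hlt : pyIdx row mid < element
        · rw [if_pos hlt, if_pos hlt, ih]
        · rw [if_neg hlt, if_neg hlt, ih]

-- A's call fuel equals B's: ((len−1) − 0 + 1).toNat = len
lemma hits_eq_binarySearchA (row : List Int) (element : Int) :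
    hits row element = binarySearchA row 0 ((row.length : Int) - 1) element := by
  unfold hits binarySearchA
  rw [hitsGo_eq_bsGo]
  have h : ((row.length : Int) - 1 - 0 + 1).toNat = row.length := by omega
  rw [h]

-- Python's row[-1] is row[len(row)-1]
lemma pyIdx_neg_one (row : List Int) : pyIdx row (-1) = pyIdx row ((row.length : Int) - 1) := by
  unfold pyIdx
  rcases List.eq_nil_or_concat row with h | ⟨pre, x, h⟩
  · subst h; rfl
  · rw [List.concat_eq_append] at h
    subst h
    rw [PySem.List.pyGet?_neg_one_append_singleton]
    have hlen : ((pre ++ [x]).length : Int) - 1 = (pre.length : Int) := by simp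
    rw [hlen, PySem.List.pyGet?_natCast]
    simp

-- the two row loops agree (both ports are totalised the same way, so no precondition is needed)
lemma goA_eq (element : Int) :
    ∀ rows : List (List Int),
      goA rows element false =
        rows.any (fun row =>
          decide (pyIdx row 0 ≤ element ∧ element ≤ pyIdx row (-1)) && hits row element) := by
  intro rows
  induction rows with
  | nil => rfl
  | cons row rest ih =>
    rw [goA, List.any_cons, hits_eq_binarySearchA, pyIdx_neg_one]
    by_cases hgate : element ≥ pyIdx row 0 ∧ element ≤ pyIdx row ((row.length : Int) - 1)
    · rw [if_pos hgate]
      have hdec : decide (pyIdx row 0 ≤ element ∧ element ≤ pyIdx row ((row.length : Int) - 1)) = true :=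
        decide_eq_true ⟨hgate.1, hgate.2⟩
      by_cases hb : binarySearchA row 0 ((row.length : Int) - 1) element = true
      · simp [hb, hdec]
      · simp only [Bool.not_eq_true] at hb
        simp [hb, hdec, ih]
    · rw [if_neg hgate]
      have hdec : decide (pyIdx row 0 ≤ element ∧ element ≤ pyIdx row ((row.length : Int) - 1)) = false :=
        decide_eq_false (fun h => hgate ⟨h.1, h.2⟩)
      simp [hdec, ih]

-- ===== VERDICT =====
theorem findElementPart2_spec : Claim_equal_findElementPart2 := by
  intro matrix element _ _
  unfold Spec_findElementPart2 findElementPart2 findElementPart2_alt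
  exact goA_eq element matrix
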